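-- pv_equiv track=rewrite | github.com/Ayush6501/2024Spr_finalproj | ThreeMParallel.py | count_available_squares
-- ===== SOURCE A (Python) =====
-- def count_available_squares(board, is_musketeer):
--     empty = []
--     if is_musketeer:
--         offsets = [(0, -1), (1, 0), (-1, 0), (0, 1)]
--         for i in range(len(board)):
--             for j in range(len(board[0])):
--                 if board[i][j] == 'M':
--                     for offset in offsets:
--                         if 0 <= i + offset[0] < 5 and 0 <= j + offset[1] < 5:
--                             if board[i + offset[0]][j + offset[1]] == ' ':
--                                 empty.append((i + offset[0], j + offset[1]))
--     else:
--         for i in range(len(board)):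
--             for j in range(len(board[0])):
--                 if board[i][j] == ' ':
--                     empty.append((i, j))
--     return len(empty)
-- ===== SOURCE B (Python) =====
-- def count_available_squares(board, is_musketeer):
--     cells = [(i, j, board[i][j]) for i in range(len(board)) for j in range(len(board[i]))]
--     if not is_musketeer:
--         return len([c for c in cells if c[2] == ' '])
--     empties = [(i, j) for (i, j, v) in cells if v == ' ' and i < 5 and j < 5]
--     ms = [(i, j) for (i, j, v) in cells if v == 'M']
--     return sum(len([m for m in ms if abs(ei - m[0]) + abs(ej - m[1]) == 1])
--                for (ei, ej) in empties)
-- ===== Notes on version B (the rewrite author's own statement) =====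
-- stated objective: alternative
-- what changed: A's M-driven nested index loops probing four neighbour offsets are replaced by a pair count: B materialises the cell list once, extracts the blank cells of the 5x5 window and the musketeer cells as two lists, and counts cross pairs at Manhattan distance 1 (the non-musketeer branch becomes a single filter over the cell list); Pre_ restricts to rectangular boards (the game's natural domain) and excludes the boundary-M boards on which A raises IndexError.
-- outside the precondition, e.g. on count_available_squares([[' '], [' ', 'M']], True): A returns 0, B returns 1; on count_available_squares([['M'], [' ', ' ']], False): A returns 1, B returns 2
import Mathlib
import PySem

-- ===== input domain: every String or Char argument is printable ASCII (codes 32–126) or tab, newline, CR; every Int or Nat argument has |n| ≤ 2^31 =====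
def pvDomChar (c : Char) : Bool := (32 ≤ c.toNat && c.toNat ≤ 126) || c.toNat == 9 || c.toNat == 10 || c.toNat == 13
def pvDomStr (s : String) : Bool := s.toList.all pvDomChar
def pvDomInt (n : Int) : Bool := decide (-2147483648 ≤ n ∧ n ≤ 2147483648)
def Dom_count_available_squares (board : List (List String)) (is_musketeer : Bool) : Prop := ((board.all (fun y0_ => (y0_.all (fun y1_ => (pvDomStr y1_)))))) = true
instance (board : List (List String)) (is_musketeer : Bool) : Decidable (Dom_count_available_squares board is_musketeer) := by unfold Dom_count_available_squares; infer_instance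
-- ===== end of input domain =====

-- B replaces A's M-driven neighbour scan by a pair count: it lists the blank cells of the
-- 5×5 window and the musketeer cells once, and counts cross pairs at Manhattan distance 1
-- (objective: alternative).

-- shared indexing helper: board[i][j] where an out-of-range access yields "" (both ports only
-- read cells whose indices are in range on inputs admitted by Pre_; Python raises out of range)
def pvCell (board : List (List String)) (i j : Nat) : String := (board.getD i []).getD j ""

-- ===== PORT A =====
def count_available_squares (board : List (List String)) (is_musketeer : Bool) : Int :=
  if is_musketeer then
    (List.range board.length).foldl (fun acc i =>
      (List.range (board.headD []).length).foldl (fun acc j =>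
        if pvCell board i j = "M" then
          [((0:Int),(-1:Int)), (1,0), (-1,0), (0,1)].foldl (fun acc o =>
            if 0 ≤ (i:Int)+o.1 ∧ (i:Int)+o.1 < 5 ∧ 0 ≤ (j:Int)+o.2 ∧ (j:Int)+o.2 < 5 then
              if pvCell board ((i:Int)+o.1).toNat ((j:Int)+o.2).toNat = " " then acc+1 else acc
            else acc) acc
        else acc) acc) 0
  else
    (List.range board.length).foldl (fun acc i =>
      (List.range (board.headD []).length).foldl (fun acc j =>
        if pvCell board i j = " " then acc+1 else acc) acc) 0

-- ===== PORT B =====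
-- cells = [(i, j, board[i][j]) ...]: the indices produced by the ranges are in bounds by
-- construction, so the getD-based pvCell read is exact here.
def pvCellsList (board : List (List String)) : List (Nat × Nat × String) :=
  (List.range board.length).flatMap
    (fun i => (List.range (board.getD i []).length).map (fun j => (i, j, pvCell board i j)))

-- empties = [(i, j) for (i, j, v) in cells if v == ' ' and i < 5 and j < 5]
def pvEmpties (board : List (List String)) : List (Nat × Nat) :=
  ((pvCellsList board).filter (fun c =>
    decide (c.2.2 = " " ∧ c.1 < 5 ∧ c.2.1 < 5))).map (fun c => (c.1, c.2.1))

-- ms = [(i, j) for (i, j, v) in cells if v == 'M']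
def pvMs (board : List (List String)) : List (Nat × Nat) :=
  ((pvCellsList board).filter (fun c => decide (c.2.2 = "M"))).map (fun c => (c.1, c.2.1))

def count_available_squares_alt (board : List (List String)) (is_musketeer : Bool) : Int :=
  if is_musketeer = false then
    (((pvCellsList board).filter (fun c => decide (c.2.2 = " "))).length : Int)
  else
    ((pvEmpties board).map (fun e =>
      (((pvMs board).filter (fun m =>
        decide (((e.1:Int) - (m.1:Int)).natAbs + ((e.2:Int) - (m.2:Int)).natAbs = 1))).length : Int))).sum

-- ===== PRECONDITION & SPEC =====
-- Pre_ restricts to rectangular boards (every row as long as row 0) — the game's natural domain;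
-- a shorter row makes Python A raise IndexError, a longer row's extra cells are accidentally
-- ignored by A's width-of-row-0 loops — and, for the musketeer branch, excludes boards with an
-- 'M' in the last row (when there are fewer than 5 rows) or in the last column (when fewer than
-- 5 columns), on which Python A raises IndexError probing the out-of-board neighbour.
def Pre_count_available_squares (board : List (List String)) (is_musketeer : Bool) : Prop :=
  (∀ row ∈ board, row.length = (board.headD []).length) ∧
  (is_musketeer = true →
    (board.length < 5 → ∀ j < 5, (board.getD (board.length - 1) []).getD j "" ≠ "M") ∧
    ((board.headD []).length < 5 → ∀ i < 5,
      (board.getD i []).getD ((board.headD []).length - 1) "" ≠ "M"))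
instance (board : List (List String)) (is_musketeer : Bool) : Decidable (Pre_count_available_squares board is_musketeer) := by unfold Pre_count_available_squares; infer_instance

def pvWitness_count_available_squares : List (List String) × Bool :=
  ([[" ", "M", " ", "x", " "], [" ", " ", " ", " ", " "]], true)

def Spec_count_available_squares (board : List (List String)) (is_musketeer : Bool) (out : Int) : Prop := out = count_available_squares_alt board is_musketeer
instance (board : List (List String)) (is_musketeer : Bool) (out : Int) : Decidable (Spec_count_available_squares board is_musketeer out) := by unfold Spec_count_available_squares; infer_instance

-- ===== CLAIM (what is proved, stated in full; the proofs are below) =====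
def Claim_equal_count_available_squares : Prop := ∀ (board : List (List String)) (is_musketeer : Bool), Dom_count_available_squares board is_musketeer → Pre_count_available_squares board is_musketeer → Spec_count_available_squares board is_musketeer (count_available_squares board is_musketeer)

-- ===== LEMMAS AND PROOFS =====

-- per-offset indicator as counted by port A: an 'M' at (i,j) whose (i+di, j+dj) neighbour lies
-- in [0,5)² and holds a blank
def pvAP (b : List (List String)) (di dj : Int) (i j : Nat) : Int :=
  if pvCell b i j = "M" ∧
     (0 ≤ (i:Int)+di ∧ (i:Int)+di < 5 ∧ 0 ≤ (j:Int)+dj ∧ (j:Int)+dj < 5) ∧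
     pvCell b ((i:Int)+di).toNat ((j:Int)+dj).toNat = " " then 1 else 0

-- indicator of 'the (i-di, j-dj) neighbour of (i,j) is inside the board and holds an M'
def pvN (b : List (List String)) (i j : Nat) (di dj : Int) : Int :=
  if 0 ≤ (i:Int)-di ∧ (i:Int)-di < (b.length:Int) ∧ 0 ≤ (j:Int)-dj ∧
     (j:Int)-dj < ((b.getD ((i:Int)-di).toNat []).length:Int) ∧
     pvCell b ((i:Int)-di).toNat ((j:Int)-dj).toNat = "M" then 1 else 0

-- per-offset indicator from the blank cell's side, with the window bounds folded in
def pvBP (b : List (List String)) (di dj : Int) (i j : Nat) : Int :=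
  if i < min 5 b.length ∧ j < min 5 (b.getD i []).length ∧ pvCell b i j = " " ∧
     0 ≤ (i:Int)-di ∧ (i:Int)-di < (b.length:Int) ∧ 0 ≤ (j:Int)-dj ∧
     (j:Int)-dj < ((b.getD ((i:Int)-di).toNat []).length:Int) ∧
     pvCell b ((i:Int)-di).toNat ((j:Int)-dj).toNat = "M" then 1 else 0

lemma pvFoldlStepSum (f : Int → Nat → Int) (g : Nat → Int)
    (h : ∀ a i, f a i = a + g i) :
    ∀ (n : Nat) (a : Int), (List.range n).foldl f a = a + ∑ i ∈ Finset.range n, g i := by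
  intro n
  induction n with
  | zero => intro a; simp
  | succ n ih =>
    intro a
    rw [List.range_succ, List.foldl_append, ih, Finset.sum_range_succ]
    simp [List.foldl, h]
    ring

lemma pvIfIfAdd (P Q : Prop) [Decidable P] [Decidable Q] (a : Int) :
    (if P then (if Q then a+1 else a) else a) = a + (if P ∧ Q then 1 else 0) := by
  by_cases hP : P <;> by_cases hQ : Q <;> simp [hP, hQ]

lemma pvIfAdd (P : Prop) [Decidable P] (a : Int) :
    (if P then a+1 else a) = a + (if P then 1 else 0) := by
  by_cases hP : P <;> simp [hP]

lemma pvSumRangeExt (f : Nat → Int) (m n : Nat) (hmn : m ≤ n)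
    (h0 : ∀ j, m ≤ j → f j = 0) :
    ∑ j ∈ Finset.range n, f j = ∑ j ∈ Finset.range m, f j := by
  refine (Finset.sum_subset (fun x hx => ?_) (fun x _ hxm => ?_)).symm
  · rw [Finset.mem_range] at *; omega
  · exact h0 x (by simpa using hxm)

lemma pvSumRangeTo6 (f : Nat → Int) (m : Nat)
    (hm : ∀ j, m ≤ j → f j = 0) (h6 : ∀ j, 6 ≤ j → f j = 0) :
    ∑ j ∈ Finset.range m, f j = ∑ j ∈ Finset.range 6, f j := by
  rcases le_total m 6 with h | h
  · exact (pvSumRangeExt f m 6 h hm).symm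
  · exact pvSumRangeExt f 6 m h h6

lemma pvShift6 (f g : Nat → Int) (hf0 : f 0 = 0) (hg5 : g 5 = 0)
    (h : ∀ j, j < 5 → f (j+1) = g j) :
    ∑ j ∈ Finset.range 6, f j = ∑ j ∈ Finset.range 6, g j := by
  have e0 := h 0 (by omega); have e1 := h 1 (by omega); have e2 := h 2 (by omega)
  have e3 := h 3 (by omega); have e4 := h 4 (by omega)
  simp only [Finset.sum_range_succ, Finset.sum_range_zero] at *
  rw [hf0, hg5, e0, e1, e2, e3, e4]
  ring

lemma pvCellLt (b : List (List String)) (i j : Nat) (s : String)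
    (h : pvCell b i j = s) (hs : s ≠ "") :
    i < b.length ∧ j < (b.getD i []).length := by
  unfold pvCell at h
  constructor
  · by_contra hc
    push_neg at hc
    rw [List.getD_eq_default _ _ hc] at h
    simp at h
    exact hs h
  · by_contra hc
    push_neg at hc
    rw [List.getD_eq_default _ _ hc] at h
    exact hs h.symm

-- with a rectangular board, any cell at column ≥ width reads ""
lemma pvCellWide (b : List (List String))
    (hrect : ∀ row ∈ b, row.length = (b.headD []).length)
    (i j : Nat) (hj : (b.headD []).length ≤ j) : pvCell b i j = "" := by
  unfold pvCell
  by_cases hi : i < b.length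
  · have hmem : b.getD i [] ∈ b := by
      rw [List.getD_eq_getElem b [] hi]; exact List.getElem_mem hi
    exact List.getD_eq_default _ _ (by rw [hrect _ hmem]; exact hj)
  · rw [List.getD_eq_default b [] (by omega)]
    simp

lemma pvCellTall (b : List (List String)) (i j : Nat) (hi : b.length ≤ i) :
    pvCell b i j = "" := by
  unfold pvCell
  rw [List.getD_eq_default _ _ hi]
  simp

lemma pvAstep (b : List (List String)) (i j : Nat) (di dj : Int) (acc : Int)
    (hM : pvCell b i j = "M") :
    (if 0 ≤ (i:Int)+di ∧ (i:Int)+di < 5 ∧ 0 ≤ (j:Int)+dj ∧ (j:Int)+dj < 5 then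
       if pvCell b ((i:Int)+di).toNat ((j:Int)+dj).toNat = " " then acc+1 else acc
     else acc) = acc + pvAP b di dj i j := by
  rw [pvIfIfAdd]
  by_cases h1 : (0 ≤ (i:Int)+di ∧ (i:Int)+di < 5 ∧ 0 ≤ (j:Int)+dj ∧ (j:Int)+dj < 5) ∧
      pvCell b ((i:Int)+di).toNat ((j:Int)+dj).toNat = " "
  · rw [if_pos h1]
    unfold pvAP
    rw [if_pos ⟨hM, h1.1, h1.2⟩]
  · rw [if_neg h1]
    unfold pvAP
    rw [if_neg (fun h => h1 ⟨h.2.1, h.2.2⟩)]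

lemma pvAstepJ (b : List (List String)) (i : Nat) (acc : Int) (j : Nat) :
    (if pvCell b i j = "M" then
       [((0:Int),(-1:Int)), (1,0), (-1,0), (0,1)].foldl (fun acc o =>
         if 0 ≤ (i:Int)+o.1 ∧ (i:Int)+o.1 < 5 ∧ 0 ≤ (j:Int)+o.2 ∧ (j:Int)+o.2 < 5 then
           if pvCell b ((i:Int)+o.1).toNat ((j:Int)+o.2).toNat = " " then acc+1 else acc
         else acc) acc
     else acc)
    = acc + (pvAP b 0 (-1) i j + pvAP b 1 0 i j + pvAP b (-1) 0 i j + pvAP b 0 1 i j) := by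
  by_cases hM : pvCell b i j = "M"
  · rw [if_pos hM]
    simp only [List.foldl_cons, List.foldl_nil]
    rw [pvAstep b i j 0 1 _ hM, pvAstep b i j (-1) 0 _ hM, pvAstep b i j 1 0 _ hM,
        pvAstep b i j 0 (-1) _ hM]
    ring
  · rw [if_neg hM]
    have hz : ∀ di dj : Int, pvAP b di dj i j = 0 := fun di dj => if_neg (fun h => hM h.1)
    rw [hz, hz, hz, hz]
    ring

lemma pvAmus (b : List (List String)) :
    count_available_squares b true
    = ∑ i ∈ Finset.range b.length, ∑ j ∈ Finset.range (b.headD []).length,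
        (pvAP b 0 (-1) i j + pvAP b 1 0 i j + pvAP b (-1) 0 i j + pvAP b 0 1 i j) := by
  unfold count_available_squares
  rw [if_pos rfl]
  exact (pvFoldlStepSum _ _
    (fun a i => pvFoldlStepSum _ _ (pvAstepJ b i) _ a) b.length 0).trans (zero_add _)

lemma pvAto6 (b : List (List String))
    (hrect : ∀ row ∈ b, row.length = (b.headD []).length) (di dj : Int)
    (hdi : di = -1 ∨ di = 0 ∨ di = 1) (hdj : dj = -1 ∨ dj = 0 ∨ dj = 1) :
    (∑ i ∈ Finset.range b.length,
       ∑ j ∈ Finset.range (b.headD []).length, pvAP b di dj i j)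
    = ∑ i ∈ Finset.range 6, ∑ j ∈ Finset.range 6, pvAP b di dj i j := by
  have hj0 : ∀ i j, (b.headD []).length ≤ j → pvAP b di dj i j = 0 := by
    intro i j hj
    refine if_neg (fun h => ?_)
    have hm := h.1
    rw [pvCellWide b hrect i j hj] at hm
    exact absurd hm (by decide)
  have hj6 : ∀ i j, 6 ≤ j → pvAP b di dj i j = 0 := by
    intro i j hj
    refine if_neg (fun h => ?_)
    obtain ⟨-, ⟨-, -, -, h4⟩, -⟩ := h
    rcases hdj with h | h | h <;> omega
  have hi0 : ∀ i, b.length ≤ i → ∀ j, pvAP b di dj i j = 0 := by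
    intro i hi j
    refine if_neg (fun h => ?_)
    have hm := h.1
    rw [pvCellTall b i j hi] at hm
    exact absurd hm (by decide)
  have hi6 : ∀ i, 6 ≤ i → ∀ j, pvAP b di dj i j = 0 := by
    intro i hi j
    refine if_neg (fun h => ?_)
    obtain ⟨-, ⟨-, h2, -⟩, -⟩ := h
    rcases hdi with h | h | h <;> omega
  calc (∑ i ∈ Finset.range b.length,
          ∑ j ∈ Finset.range (b.headD []).length, pvAP b di dj i j)
      = ∑ i ∈ Finset.range b.length, ∑ j ∈ Finset.range 6, pvAP b di dj i j :=
        Finset.sum_congr rfl fun i _ => pvSumRangeTo6 _ _ (hj0 i) (hj6 i)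
    _ = ∑ i ∈ Finset.range 6, ∑ j ∈ Finset.range 6, pvAP b di dj i j :=
        pvSumRangeTo6 _ b.length
          (fun i hi => Finset.sum_eq_zero fun j _ => hi0 i hi j)
          (fun i hi => Finset.sum_eq_zero fun j _ => hi6 i hi j)

lemma pvEq1 (b : List (List String)) (i j : Nat) (hj : j < 5) :
    pvAP b 0 (-1) i (j+1) = pvBP b 0 (-1) i j := by
  have t1 : ((i:Int)+(0:Int)).toNat = i := by omega
  have t2 : (((j+1:Nat):Int)+(-1:Int)).toNat = j := by omega
  have t3 : ((i:Int)-(0:Int)).toNat = i := by omega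
  have t4 : (((j:Nat):Int)-(-1:Int)).toNat = j+1 := by omega
  unfold pvAP pvBP
  rw [t1, t2, t3, t4]
  by_cases hM : pvCell b i (j+1) = "M"
  · by_cases hE : pvCell b i j = " "
    · obtain ⟨hr1, hr2⟩ := pvCellLt b i (j+1) _ hM (by decide)
      obtain ⟨hr3, hr4⟩ := pvCellLt b i j _ hE (by decide)
      refine if_congr ?_ rfl rfl
      constructor
      · rintro ⟨-, ⟨h1, h2, h3, h4⟩, -⟩
        exact ⟨by omega, by omega, hE, by omega, by omega, by omega, by omega, hM⟩
      · rintro ⟨h1, h2, -, h3, h4, h5, h6, -⟩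
        exact ⟨hM, ⟨by omega, by omega, by omega, by omega⟩, hE⟩
    · rw [if_neg (fun h => hE h.2.2), if_neg (fun h => hE h.2.2.1)]
  · rw [if_neg (fun h => hM h.1), if_neg (fun h => hM h.2.2.2.2.2.2.2)]

lemma pvEq2 (b : List (List String)) (i j : Nat) :
    pvAP b 1 0 i j = pvBP b 1 0 (i+1) j := by
  have t1 : ((i:Int)+(1:Int)).toNat = i+1 := by omega
  have t2 : (((j:Nat):Int)+(0:Int)).toNat = j := by omega
  have t3 : (((i+1:Nat):Int)-(1:Int)).toNat = i := by omega
  have t4 : (((j:Nat):Int)-(0:Int)).toNat = j := by omega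
  unfold pvAP pvBP
  rw [t1, t2, t3, t4]
  by_cases hM : pvCell b i j = "M"
  · by_cases hE : pvCell b (i+1) j = " "
    · obtain ⟨hr1, hr2⟩ := pvCellLt b i j _ hM (by decide)
      obtain ⟨hr3, hr4⟩ := pvCellLt b (i+1) j _ hE (by decide)
      refine if_congr ?_ rfl rfl
      constructor
      · rintro ⟨-, ⟨h1, h2, h3, h4⟩, -⟩
        exact ⟨by omega, by omega, hE, by omega, by omega, by omega, by omega, hM⟩
      · rintro ⟨h1, h2, -, h3, h4, h5, h6, -⟩
        exact ⟨hM, ⟨by omega, by omega, by omega, by omega⟩, hE⟩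
    · rw [if_neg (fun h => hE h.2.2), if_neg (fun h => hE h.2.2.1)]
  · rw [if_neg (fun h => hM h.1), if_neg (fun h => hM h.2.2.2.2.2.2.2)]

lemma pvEq3 (b : List (List String)) (i j : Nat) :
    pvAP b (-1) 0 (i+1) j = pvBP b (-1) 0 i j := by
  have t1 : (((i+1:Nat):Int)+(-1:Int)).toNat = i := by omega
  have t2 : (((j:Nat):Int)+(0:Int)).toNat = j := by omega
  have t3 : (((i:Nat):Int)-(-1:Int)).toNat = i+1 := by omega
  have t4 : (((j:Nat):Int)-(0:Int)).toNat = j := by omega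
  unfold pvAP pvBP
  rw [t1, t2, t3, t4]
  by_cases hM : pvCell b (i+1) j = "M"
  · by_cases hE : pvCell b i j = " "
    · obtain ⟨hr1, hr2⟩ := pvCellLt b (i+1) j _ hM (by decide)
      obtain ⟨hr3, hr4⟩ := pvCellLt b i j _ hE (by decide)
      refine if_congr ?_ rfl rfl
      constructor
      · rintro ⟨-, ⟨h1, h2, h3, h4⟩, -⟩
        exact ⟨by omega, by omega, hE, by omega, by omega, by omega, by omega, hM⟩
      · rintro ⟨h1, h2, -, h3, h4, h5, h6, -⟩
        exact ⟨hM, ⟨by omega, by omega, by omega, by omega⟩, hE⟩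
    · rw [if_neg (fun h => hE h.2.2), if_neg (fun h => hE h.2.2.1)]
  · rw [if_neg (fun h => hM h.1), if_neg (fun h => hM h.2.2.2.2.2.2.2)]

lemma pvEq4 (b : List (List String)) (i j : Nat) :
    pvBP b 0 1 i (j+1) = pvAP b 0 1 i j := by
  have t1 : ((i:Int)-(0:Int)).toNat = i := by omega
  have t2 : (((j+1:Nat):Int)-(1:Int)).toNat = j := by omega
  have t3 : ((i:Int)+(0:Int)).toNat = i := by omega
  have t4 : (((j:Nat):Int)+(1:Int)).toNat = j+1 := by omega
  unfold pvAP pvBP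
  rw [t1, t2, t3, t4]
  by_cases hM : pvCell b i j = "M"
  · by_cases hE : pvCell b i (j+1) = " "
    · obtain ⟨hr1, hr2⟩ := pvCellLt b i j _ hM (by decide)
      obtain ⟨hr3, hr4⟩ := pvCellLt b i (j+1) _ hE (by decide)
      refine if_congr ?_ rfl rfl
      constructor
      · rintro ⟨h1, h2, -, h3, h4, h5, h6, -⟩
        exact ⟨hM, ⟨by omega, by omega, by omega, by omega⟩, hE⟩
      · rintro ⟨-, ⟨h1, h2, h3, h4⟩, -⟩
        exact ⟨by omega, by omega, hE, by omega, by omega, by omega, by omega, hM⟩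
    · rw [if_neg (fun h => hE h.2.2.1), if_neg (fun h => hE h.2.2)]
  · rw [if_neg (fun h => hM h.2.2.2.2.2.2.2), if_neg (fun h => hM h.1)]

-- ===== B-side lemmas: from list combinators to double sums =====

lemma pvFilterMapSum {α : Type} (p : α → Bool) (G : α → Int) (l : List α) :
    ((l.filter p).map G).sum = (l.map (fun x => if p x then G x else 0)).sum := by
  induction l with
  | nil => rfl
  | cons a t ih =>
    by_cases h : p a <;> simp [h, ih]

lemma pvFilterLenSum {α : Type} (p : α → Bool) (l : List α) :
    (((l.filter p).length : Int)) = (l.map (fun x => if p x then (1:Int) else 0)).sum := by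
  induction l with
  | nil => rfl
  | cons a t ih =>
    by_cases h : p a <;> simp [h, ← ih] <;> ring

lemma pvMapRangeSum (g : Nat → Int) : ∀ (n : Nat),
    ((List.range n).map g).sum = ∑ i ∈ Finset.range n, g i := by
  intro n
  induction n with
  | zero => rfl
  | succ n ih =>
    rw [List.range_succ, List.map_append, List.sum_append, ih, Finset.sum_range_succ]
    simp

lemma pvFlatMapRangeSum {α : Type} (f : Nat → List α) (G : α → Int) : ∀ (n : Nat),
    (((List.range n).flatMap f).map G).sum
    = ∑ i ∈ Finset.range n, ((f i).map G).sum := by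
  intro n
  induction n with
  | zero => rfl
  | succ n ih =>
    rw [List.range_succ, List.flatMap_append, List.map_append, List.sum_append, ih,
        Finset.sum_range_succ]
    simp

-- the cells list, summed through any per-cell integer weight, is a double sum over indices
lemma pvCellsSum (b : List (List String)) (G : Nat × Nat × String → Int) :
    (((pvCellsList b).map G).sum)
    = ∑ i ∈ Finset.range b.length, ∑ j ∈ Finset.range (b.getD i []).length,
        G (i, j, pvCell b i j) := by
  unfold pvCellsList
  rw [pvFlatMapRangeSum]
  refine Finset.sum_congr rfl fun i _ => ?_
  rw [List.map_map, pvMapRangeSum]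
  rfl

-- collapse a double sum of a two-point indicator
lemma pvPoint2 (R : Nat) (L : Nat → Nat) (a c : Nat) (P : Nat → Nat → Prop)
    [inst : ∀ x y, Decidable (P x y)] :
    (∑ mi ∈ Finset.range R, ∑ mj ∈ Finset.range (L mi),
       if mi = a ∧ mj = c ∧ P mi mj then (1:Int) else 0)
    = if a < R ∧ c < L a ∧ P a c then 1 else 0 := by
  have inner : ∀ mi, (∑ mj ∈ Finset.range (L mi),
      if mi = a ∧ mj = c ∧ P mi mj then (1:Int) else 0)
      = if mi = a then (if c < L mi ∧ P mi c then 1 else 0) else 0 := by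
    intro mi
    by_cases h : mi = a
    · subst h
      simp only [true_and]
      have : ∀ mj, (if mj = c ∧ P mi mj then (1:Int) else 0)
          = if mj = c then (if P mi mj then (1:Int) else 0) else 0 := by
        intro mj; by_cases h1 : mj = c <;> simp [h1]
      rw [Finset.sum_congr rfl (fun mj _ => this mj), Finset.sum_ite_eq' (Finset.range (L mi)) c]
      simp only [Finset.mem_range]
      by_cases hc : c < L mi <;> by_cases hp : P mi c <;> simp [hc, hp]
    · simp [h]
  rw [Finset.sum_congr rfl (fun mi _ => inner mi)]
  have : ∀ mi, (if mi = a then (if c < L mi ∧ P mi c then (1:Int) else 0) else 0)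
      = if mi = a then ((fun x => if c < L x ∧ P x c then (1:Int) else 0) mi) else 0 := by
    intro mi; rfl
  rw [Finset.sum_congr rfl (fun mi _ => this mi), Finset.sum_ite_eq' (Finset.range R) a]
  simp only [Finset.mem_range]
  by_cases ha : a < R <;> by_cases hrest : c < L a ∧ P a c <;> simp [ha, hrest]

-- number of musketeer cells at Manhattan distance 1 from (i,j), as four neighbour indicators
lemma pvGe (b : List (List String)) (i j : Nat) :
    (∑ mi ∈ Finset.range b.length, ∑ mj ∈ Finset.range (b.getD mi []).length,
       if pvCell b mi mj = "M" ∧ ((i:Int) - mi).natAbs + ((j:Int) - mj).natAbs = 1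
       then (1:Int) else 0)
    = pvN b i j 0 (-1) + pvN b i j 1 0 + pvN b i j (-1) 0 + pvN b i j 0 1 := by
  have split : ∀ mi mj : Nat,
      (if pvCell b mi mj = "M" ∧ ((i:Int) - mi).natAbs + ((j:Int) - mj).natAbs = 1
       then (1:Int) else 0)
      = (if mi = i ∧ mj = j+1 ∧ pvCell b mi mj = "M" then (1:Int) else 0)
      + (if (i = mi+1 ∧ mj = j) ∧ pvCell b mi mj = "M" then (1:Int) else 0)
      + (if mi = i+1 ∧ mj = j ∧ pvCell b mi mj = "M" then (1:Int) else 0)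
      + (if (mi = i ∧ j = mj+1) ∧ pvCell b mi mj = "M" then (1:Int) else 0) := by
    intro mi mj
    by_cases hM : pvCell b mi mj = "M"
    · simp only [hM, and_true, true_and]
      split_ifs <;> omega
    · rw [if_neg (fun h => hM h.1),
         if_neg (show ¬(mi = i ∧ mj = j+1 ∧ pvCell b mi mj = "M") from fun h => hM h.2.2),
         if_neg (show ¬((i = mi+1 ∧ mj = j) ∧ pvCell b mi mj = "M") from fun h => hM h.2),
         if_neg (show ¬(mi = i+1 ∧ mj = j ∧ pvCell b mi mj = "M") from fun h => hM h.2.2),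
         if_neg (show ¬((mi = i ∧ j = mj+1) ∧ pvCell b mi mj = "M") from fun h => hM h.2)]
      norm_num
  rw [Finset.sum_congr rfl fun mi _ => Finset.sum_congr rfl fun mj _ => split mi mj]
  simp only [Finset.sum_add_distrib]
  congr 1
  congr 1
  congr 1
  -- right neighbour (i, j+1) ↔ offset (0,-1)
  · rw [pvPoint2 b.length (fun mi => (b.getD mi []).length) i (j+1)
      (fun mi mj => pvCell b mi mj = "M")]
    unfold pvN
    have t1 : ((i:Int) - 0).toNat = i := by omega
    have t2 : ((j:Int) - (-1)).toNat = j+1 := by omega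
    rw [t1, t2]
    refine if_congr ⟨fun h => ⟨by omega, by omega, by omega, by omega, h.2.2⟩,
      fun h => ⟨by omega, by omega, h.2.2.2.2⟩⟩ rfl rfl
  -- upper neighbour (i-1, j) ↔ offset (1,0)
  · rcases i with _ | i0
    · have hz : ∀ mi mj : Nat,
          (if ((0:Nat) = mi+1 ∧ mj = j) ∧ pvCell b mi mj = "M" then (1:Int) else 0) = 0 := by
        intro mi mj; exact if_neg (by rintro ⟨⟨h, -⟩, -⟩; omega)
      rw [Finset.sum_congr rfl fun mi _ => Finset.sum_congr rfl fun mj _ => hz mi mj]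
      simp only [Finset.sum_const_zero]
      unfold pvN
      rw [if_neg (by rintro ⟨h, -⟩; omega)]
    · have he : ∀ mi mj : Nat,
          (if ((i0+1:Nat) = mi+1 ∧ mj = j) ∧ pvCell b mi mj = "M" then (1:Int) else 0)
          = if mi = i0 ∧ mj = j ∧ pvCell b mi mj = "M" then (1:Int) else 0 := by
        intro mi mj
        refine if_congr ⟨fun h => ⟨by omega, h.1.2, h.2⟩,
          fun h => ⟨⟨by omega, h.2.1⟩, h.2.2⟩⟩ rfl rfl
      rw [Finset.sum_congr rfl fun mi _ => Finset.sum_congr rfl fun mj _ => he mi mj,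
        pvPoint2 b.length (fun mi => (b.getD mi []).length) i0 j
          (fun mi mj => pvCell b mi mj = "M")]
      unfold pvN
      have t1 : (((i0+1:Nat):Int) - 1).toNat = i0 := by omega
      have t2 : ((j:Int) - 0).toNat = j := by omega
      rw [t1, t2]
      refine if_congr ⟨fun h => ⟨by omega, by omega, by omega, by omega, h.2.2⟩,
        fun h => ⟨by omega, by omega, h.2.2.2.2⟩⟩ rfl rfl
  -- lower neighbour (i+1, j) ↔ offset (-1,0)
  · rw [pvPoint2 b.length (fun mi => (b.getD mi []).length) (i+1) j
      (fun mi mj => pvCell b mi mj = "M")]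
    unfold pvN
    have t1 : ((i:Int) - (-1)).toNat = i+1 := by omega
    have t2 : ((j:Int) - 0).toNat = j := by omega
    rw [t1, t2]
    refine if_congr ⟨fun h => ⟨by omega, by omega, by omega, by omega, h.2.2⟩,
      fun h => ⟨by omega, by omega, h.2.2.2.2⟩⟩ rfl rfl
  -- left neighbour (i, j-1) ↔ offset (0,1)
  · rcases j with _ | j0
    · have hz : ∀ mi mj : Nat,
          (if (mi = i ∧ (0:Nat) = mj+1) ∧ pvCell b mi mj = "M" then (1:Int) else 0) = 0 := by
        intro mi mj; exact if_neg (by rintro ⟨⟨-, h⟩, -⟩; omega)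
      rw [Finset.sum_congr rfl fun mi _ => Finset.sum_congr rfl fun mj _ => hz mi mj]
      simp only [Finset.sum_const_zero]
      unfold pvN
      rw [if_neg (by rintro ⟨-, -, h, -⟩; omega)]
    · have he : ∀ mi mj : Nat,
          (if (mi = i ∧ (j0+1:Nat) = mj+1) ∧ pvCell b mi mj = "M" then (1:Int) else 0)
          = if mi = i ∧ mj = j0 ∧ pvCell b mi mj = "M" then (1:Int) else 0 := by
        intro mi mj
        refine if_congr ⟨fun h => ⟨h.1.1, by omega, h.2⟩,
          fun h => ⟨⟨h.1, by omega⟩, h.2.2⟩⟩ rfl rfl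
      rw [Finset.sum_congr rfl fun mi _ => Finset.sum_congr rfl fun mj _ => he mi mj,
        pvPoint2 b.length (fun mi => (b.getD mi []).length) i j0
          (fun mi mj => pvCell b mi mj = "M")]
      unfold pvN
      have t1 : ((i:Int) - 0).toNat = i := by omega
      have t2 : (((j0+1:Nat):Int) - 1).toNat = j0 := by omega
      rw [t1, t2]
      refine if_congr ⟨fun h => ⟨by omega, by omega, by omega, by omega, h.2.2⟩,
        fun h => ⟨by omega, by omega, h.2.2.2.2⟩⟩ rfl rfl

-- B's musketeer branch as a double sum of window-blank cells weighted by neighbour Ms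
lemma pvBmus (b : List (List String)) :
    count_available_squares_alt b true
    = ∑ i ∈ Finset.range b.length, ∑ j ∈ Finset.range (b.getD i []).length,
        (if pvCell b i j = " " ∧ i < 5 ∧ j < 5
         then pvN b i j 0 (-1) + pvN b i j 1 0 + pvN b i j (-1) 0 + pvN b i j 0 1
         else 0) := by
  unfold count_available_squares_alt
  rw [if_neg (by decide)]
  unfold pvEmpties
  rw [List.map_map, pvFilterMapSum, pvCellsSum]
  refine Finset.sum_congr rfl fun i _ => Finset.sum_congr rfl fun j _ => ?_
  simp only [Function.comp]
  by_cases hP : pvCell b i j = " " ∧ i < 5 ∧ j < 5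
  · rw [if_pos (by simpa using hP), if_pos hP]
    unfold pvMs
    rw [List.filter_map, List.length_map, List.filter_filter, pvFilterLenSum, pvCellsSum,
      ← pvGe b i j]
    refine Finset.sum_congr rfl fun mi _ => Finset.sum_congr rfl fun mj _ => ?_
    refine if_congr ?_ rfl rfl
    simp only [Function.comp, decide_eq_true_eq, Bool.and_eq_true]
    tauto
  · rw [if_neg (by simpa using hP), if_neg hP]

-- inside the index ranges, the grouped-blank summand is the sum of the four pvBP indicators
lemma pvGrouped (b : List (List String)) (i j : Nat) (hi : i < b.length)
    (hj : j < (b.getD i []).length) :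
    (if pvCell b i j = " " ∧ i < 5 ∧ j < 5
     then pvN b i j 0 (-1) + pvN b i j 1 0 + pvN b i j (-1) 0 + pvN b i j 0 1
     else 0)
    = pvBP b 0 (-1) i j + pvBP b 1 0 i j + pvBP b (-1) 0 i j + pvBP b 0 1 i j := by
  by_cases hP : pvCell b i j = " " ∧ i < 5 ∧ j < 5
  · rw [if_pos hP]
    obtain ⟨hE, hi5, hj5⟩ := hP
    have conv : ∀ di dj : Int, pvBP b di dj i j = pvN b i j di dj := by
      intro di dj
      unfold pvBP pvN
      refine if_congr ⟨fun h => h.2.2.2, fun h => ⟨by omega, by omega, hE, h⟩⟩ rfl rfl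
    rw [conv, conv, conv, conv]
  · rw [if_neg hP]
    have hz : ∀ di dj : Int, pvBP b di dj i j = 0 := by
      intro di dj
      refine if_neg (fun h => hP ⟨h.2.2.1, by omega, by omega⟩)
    rw [hz, hz, hz, hz]
    norm_num

-- a pvBP double sum over the board's index ranges extends to the fixed 6×6 window
lemma pvBto6 (b : List (List String)) (di dj : Int) :
    (∑ i ∈ Finset.range b.length, ∑ j ∈ Finset.range (b.getD i []).length, pvBP b di dj i j)
    = ∑ i ∈ Finset.range 6, ∑ j ∈ Finset.range 6, pvBP b di dj i j := by
  have hj : ∀ i, ∑ j ∈ Finset.range (b.getD i []).length, pvBP b di dj i j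
      = ∑ j ∈ Finset.range 6, pvBP b di dj i j := by
    intro i
    refine pvSumRangeTo6 _ _ (fun j hjl => if_neg ?_) (fun j hj6 => if_neg ?_)
    · rintro ⟨-, h, -⟩; omega
    · rintro ⟨-, h, -⟩; omega
  rw [Finset.sum_congr rfl fun i _ => hj i]
  refine pvSumRangeTo6 _ _ (fun i hil => Finset.sum_eq_zero fun j _ => if_neg ?_)
    (fun i hi6 => Finset.sum_eq_zero fun j _ => if_neg ?_)
  · rintro ⟨h, -⟩; omega
  · rintro ⟨h, -⟩; omega

lemma pvMusEq (b : List (List String))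
    (hrect : ∀ row ∈ b, row.length = (b.headD []).length) :
    count_available_squares b true = count_available_squares_alt b true := by
  rw [pvAmus, pvBmus,
    Finset.sum_congr rfl fun i hi => Finset.sum_congr rfl fun j hj =>
      pvGrouped b i j (Finset.mem_range.mp hi) (Finset.mem_range.mp hj)]
  simp only [Finset.sum_add_distrib]
  rw [pvAto6 b hrect 0 (-1) (by tauto) (by tauto),
      pvAto6 b hrect 1 0 (by tauto) (by tauto),
      pvAto6 b hrect (-1) 0 (by tauto) (by tauto),
      pvAto6 b hrect 0 1 (by tauto) (by tauto),
      pvBto6 b 0 (-1), pvBto6 b 1 0, pvBto6 b (-1) 0, pvBto6 b 0 1]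
  have h1 : (∑ i ∈ Finset.range 6, ∑ j ∈ Finset.range 6, pvAP b 0 (-1) i j)
      = ∑ i ∈ Finset.range 6, ∑ j ∈ Finset.range 6, pvBP b 0 (-1) i j := by
    refine Finset.sum_congr rfl fun i _ => ?_
    refine pvShift6 _ _ ?_ ?_ (fun j hj => pvEq1 b i j hj)
    · exact if_neg (by rintro ⟨-, ⟨-, -, h3, -⟩, -⟩; omega)
    · exact if_neg (by rintro ⟨-, h2, -⟩; omega)
  have h2 : (∑ i ∈ Finset.range 6, ∑ j ∈ Finset.range 6, pvAP b 1 0 i j)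
      = ∑ i ∈ Finset.range 6, ∑ j ∈ Finset.range 6, pvBP b 1 0 i j := by
    refine (pvShift6 (fun i => ∑ j ∈ Finset.range 6, pvBP b 1 0 i j)
      (fun i => ∑ j ∈ Finset.range 6, pvAP b 1 0 i j) ?_ ?_
      (fun i _ => Finset.sum_congr rfl fun j _ => (pvEq2 b i j).symm)).symm
    · exact Finset.sum_eq_zero fun j _ => if_neg (by rintro ⟨-, -, -, h4, -⟩; omega)
    · exact Finset.sum_eq_zero fun j _ => if_neg (by rintro ⟨-, ⟨-, h2, -⟩, -⟩; omega)
  have h3 : (∑ i ∈ Finset.range 6, ∑ j ∈ Finset.range 6, pvAP b (-1) 0 i j)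
      = ∑ i ∈ Finset.range 6, ∑ j ∈ Finset.range 6, pvBP b (-1) 0 i j := by
    refine pvShift6 _ _ ?_ ?_ (fun i _ => Finset.sum_congr rfl fun j _ => pvEq3 b i j)
    · exact Finset.sum_eq_zero fun j _ => if_neg (by rintro ⟨-, ⟨h1, -⟩, -⟩; omega)
    · exact Finset.sum_eq_zero fun j _ => if_neg (by rintro ⟨h1, -⟩; omega)
  have h4 : (∑ i ∈ Finset.range 6, ∑ j ∈ Finset.range 6, pvAP b 0 1 i j)
      = ∑ i ∈ Finset.range 6, ∑ j ∈ Finset.range 6, pvBP b 0 1 i j := by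
    refine Finset.sum_congr rfl fun i _ => ?_
    refine (pvShift6 (fun j => pvBP b 0 1 i j) (fun j => pvAP b 0 1 i j) ?_ ?_
      (fun j hj => pvEq4 b i j)).symm
    · exact if_neg (by rintro ⟨-, -, -, -, -, h6, -⟩; omega)
    · exact if_neg (by rintro ⟨-, ⟨-, -, -, h4⟩, -⟩; omega)
  rw [h1, h2, h3, h4]

lemma pvNonmusEq (b : List (List String))
    (hrect : ∀ row ∈ b, row.length = (b.headD []).length) :
    count_available_squares b false = count_available_squares_alt b false := by
  unfold count_available_squares count_available_squares_alt
  rw [if_neg (by decide), if_pos rfl, pvFilterLenSum, pvCellsSum]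
  have hA : (List.range b.length).foldl (fun acc i =>
      (List.range (b.headD []).length).foldl (fun acc j =>
        if pvCell b i j = " " then acc+1 else acc) acc) 0
      = ∑ i ∈ Finset.range b.length, ∑ j ∈ Finset.range (b.headD []).length,
          (if pvCell b i j = " " then (1:Int) else 0) :=
    (pvFoldlStepSum _ _
      (fun a i => pvFoldlStepSum _ _ (fun a j => pvIfAdd (pvCell b i j = " ") a)
        (b.headD []).length a)
      b.length 0).trans (zero_add _)
  rw [hA]
  refine Finset.sum_congr rfl fun i hi => ?_
  have hmem : b.getD i [] ∈ b := by
    have hi' : i < b.length := Finset.mem_range.mp hi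
    rw [List.getD_eq_getElem b [] hi']
    exact List.getElem_mem hi'
  rw [hrect _ hmem]
  refine Finset.sum_congr rfl fun j _ => ?_
  refine if_congr ?_ rfl rfl
  simp

-- ===== VERDICT (by name: the statement is the Claim_ definition above) =====
theorem count_available_squares_spec : Claim_equal_count_available_squares := by
  intro board is_musketeer _ hpre
  unfold Spec_count_available_squares
  cases is_musketeer
  · exact pvNonmusEq board hpre.1
  · exact pvMusEq board hpre.1
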